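-- pv_equiv track=rewrite | github.com/HenriqueMartinsBotelho/algoritmos | EstagioDocencia/minhasSolucoes/lab3/ex13.py | parPiramidal
-- ===== SOURCE A (Python) =====
-- def tamanho(x):
--     soma = 0
--     i = 0
--     while soma <= x:
--         soma += i
--         i += 1
--         if soma == x:
--             return i
--     return False
--
-- def somaLinhas(lista):
--     somai = 0
--     somap = 0
--     x = 0
--     h = 0
--     vetor = []
--     for i in range(tamanho(len(lista))):
--         for j in range(i):
--             if h % 2 == 0:
--                 somai = somai + lista[x]
--             if h % 2 == 1:
--                 somap = somap + lista[x]
--             x = x + 1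
--         if h % 2 == 0:
--             vetor.append(somai)
--         else:
--             vetor.append(somap)
--         h += 1
--         somai = 0
--         somap = 0
--     return vetor
--
-- def parPiramidal(lista):
--     lista = somaLinhas(lista)
--     lista.remove(0)
--     ok = False
--     for i in range(len(lista)):
--         if i % 2 == 0:
--             if lista[i] % 2 == 0:
--                 ok = True
--             else:
--                 return False
--         if i % 2 == 1:
--             if lista[i] % 2 == 1:
--                 ok = True
--             else:
--                 return False
--     return ok
-- ===== SOURCE B (Python) =====
-- def parPiramidal(lista):
--     n = len(lista)
--     r = 1
--     while r * (r - 1) // 2 < n: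
--         r += 1
--     if r * (r - 1) // 2 != n:
--         raise ValueError("list length is not triangular")
--     idx = 0
--     for k in range(1, r):
--         s = sum(lista[idx:idx + k])
--         if s % 2 != (k - 1) % 2:
--             return False
--         idx += k
--     return n > 0
-- ===== Notes on version B (the rewrite author's own statement) =====
-- stated objective: faster
-- what changed: B computes the row count r directly from the length by an O(sqrt n) search, then makes a single pass over the list summing each row slice and testing its parity immediately with early exit, instead of A's nested index loops that build the full list of row sums (juggling two alternating accumulators), remove the leading 0, and only then scan it for parity.
import Mathlib
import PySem

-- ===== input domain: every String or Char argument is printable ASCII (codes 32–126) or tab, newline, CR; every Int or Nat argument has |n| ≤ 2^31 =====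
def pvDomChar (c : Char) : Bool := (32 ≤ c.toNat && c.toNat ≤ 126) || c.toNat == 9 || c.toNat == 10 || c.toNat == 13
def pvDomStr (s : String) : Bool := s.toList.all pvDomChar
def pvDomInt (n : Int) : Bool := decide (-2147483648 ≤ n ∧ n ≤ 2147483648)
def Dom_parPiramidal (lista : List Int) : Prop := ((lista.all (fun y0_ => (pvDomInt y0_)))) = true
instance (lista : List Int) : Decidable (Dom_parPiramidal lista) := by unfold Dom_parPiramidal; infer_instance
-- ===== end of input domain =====

-- B replaces A's two-phase nested-loop scheme (build all row sums, remove the 0, then scan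
-- parities) by a direct row-count computation and one slice-summing pass with early exit.

-- ===== PORT A =====

-- while soma <= x: soma += i; i += 1; if soma == x: return i   -- 'return False' modelled as none
def tamanhoAux (x soma i : Int) : Option Int :=
  if h1 : soma ≤ x then
    if soma + i = x then some (i + 1)
    else tamanhoAux x (soma + i) (i + 1)
  else none
termination_by (2 * x - 2 * soma + i * i - 2 * i + 2).toNat
decreasing_by
  have e1 : 2 * x - 2 * (soma + i) + (i + 1) * (i + 1) - 2 * (i + 1) + 2
      = (2 * x - 2 * soma + i * i - 2 * i + 2) - 1 := by ring
  have e2 : 2 * x - 2 * soma + i * i - 2 * i + 2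
      = 2 * (x - soma) + ((i - 1) * (i - 1) + 1) := by ring
  have q1 : (0 : Int) ≤ 2 * (x - soma) := Int.mul_nonneg (by decide) (Int.sub_nonneg.mpr h1)
  have q2 : (0 : Int) < (i - 1) * (i - 1) + 1 := Int.lt_add_one_of_le (mul_self_nonneg _)
  have pos : 0 < 2 * x - 2 * soma + i * i - 2 * i + 2 := by
    rw [e2]; exact add_pos_of_nonneg_of_pos q1 q2
  rw [e1]
  exact (Int.toNat_lt_toNat pos).mpr (sub_one_lt _)

def tamanho (x : Int) : Option Int := tamanhoAux x 0 0

-- the body of 'for j in range(i)' (state somai, somap, x; j is unused by the body)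
def innerStep (lista : List Int) (h : Int) (s : Int × Int × Int) (_j : Int) : Int × Int × Int :=
  let somai := if PySem.Int.mod h 2 = 0 then s.1 + PySem.List.pyGetD lista s.2.2 0 else s.1
  let somap := if PySem.Int.mod h 2 = 1 then s.2.1 + PySem.List.pyGetD lista s.2.2 0 else s.2.1
  (somai, somap, s.2.2 + 1)
  -- lista[x] is pyGetD: within Pre_ the index is always in range, so the default is never used

-- the body of 'for i in range(tamanho(len(lista)))' (state somai, somap, x, h, vetor)
def outerStep (lista : List Int) (st : Int × Int × Int × Int × List Int) (i : Int) :
    Int × Int × Int × Int × List Int :=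
  let (somai, somap, x, h, vetor) := st
  let r := (PySem.List.pyRange 0 i 1).foldl (innerStep lista h) (somai, somap, x)
  let vetor := if PySem.Int.mod h 2 = 0 then vetor ++ [r.1] else vetor ++ [r.2.1]
  (0, 0, r.2.2, h + 1, vetor)

def somaLinhas (lista : List Int) : List Int :=
  let t : Int := match tamanho (lista.length : Int) with
    | some k => k
    | none => 0          -- Python's False: range(False) = range(0)
  ((PySem.List.pyRange 0 t 1).foldl (outerStep lista) (0, 0, 0, 0, [])).2.2.2.2

-- the final 'for i in range(len(lista))' loop with its early returns
def parChk : List Int → Int → Bool → Bool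
  | [], _, ok => ok
  | a :: rest, i, _ok =>
    if PySem.Int.mod i 2 = 0 then
      if PySem.Int.mod a 2 = 0 then parChk rest (i + 1) true else false
    else
      if PySem.Int.mod a 2 = 1 then parChk rest (i + 1) true else false

def parPiramidal (lista : List Int) : Bool :=
  let l := somaLinhas lista
  match PySem.List.remove? l 0 with
  | none => false        -- Python raises ValueError here; excluded by Pre_
  | some l' => parChk l' 0 false

-- ===== PORT B =====

-- while r*(r-1)//2 < n: r += 1
def findR (n r : Nat) : Nat :=
  if hg : r * (r - 1) / 2 < n then findR n (r + 1) else r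
termination_by n + 1 - r
decreasing_by
  have hn : 0 < n := Nat.lt_of_le_of_lt (Nat.zero_le _) hg
  have hr : r ≤ n := by
    rcases Nat.lt_or_ge r 2 with h2 | h2
    · exact Nat.le_trans (Nat.le_of_lt_succ h2) hn
    · have h3 : (r - 1) * 2 ≤ (r - 1) * r := Nat.mul_le_mul_left _ h2
      have h4 : r - 1 ≤ r * (r - 1) / 2 :=
        (Nat.le_div_iff_mul_le (by decide)).mpr (Nat.mul_comm (r - 1) r ▸ h3)
      have h5 : r - 1 + 1 ≤ n := Nat.lt_of_le_of_lt h4 hg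
      exact (Nat.sub_add_cancel (Nat.le_of_succ_le h2)) ▸ h5
  exact Nat.sub_succ_lt_self (n + 1) r (Nat.lt_succ_of_le hr)

def bLoop (lista : List Int) (n r k idx : Nat) : Bool :=
  if _hkr : k < r then
    let s := (PySem.List.slice lista (some (idx : Int)) (some ((idx : Int) + (k : Int)))).sum
    if PySem.Int.mod s 2 ≠ (((k - 1) % 2 : Nat) : Int) then false
    else bLoop lista n r (k + 1) (idx + k)
  else decide (0 < n)
termination_by r - k
decreasing_by exact Nat.sub_succ_lt_self r k _hkr

def parPiramidal_alt (lista : List Int) : Bool :=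
  let n := lista.length
  let r := findR n 1
  if r * (r - 1) / 2 ≠ n then false   -- Python raises ValueError here; excluded by Pre_
  else bLoop lista n r 1 0

-- ===== PRECONDITION & SPEC =====
-- Pre_ admits exactly the triangular lengths: on any other length A's 'lista.remove(0)' runs on
-- an empty list and raises ValueError (B raises ValueError there too), so A returns no value.
def Pre_parPiramidal (lista : List Int) : Prop :=
  ∃ m < lista.length + 1, m * (m + 1) = 2 * lista.length
instance (lista : List Int) : Decidable (Pre_parPiramidal lista) := by
  unfold Pre_parPiramidal; infer_instance

def pvWitness_parPiramidal : List Int := [2, 1, 2, 3, 5, 6]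

def Spec_parPiramidal (lista : List Int) (out : Bool) : Prop := out = parPiramidal_alt lista
instance (lista : List Int) (out : Bool) : Decidable (Spec_parPiramidal lista out) := by
  unfold Spec_parPiramidal; infer_instance

-- ===== CLAIM (what is proved, stated in full; the proofs are below) =====
def Claim_equal_parPiramidal : Prop := ∀ (lista : List Int), Dom_parPiramidal lista →
  Pre_parPiramidal lista → Spec_parPiramidal lista (parPiramidal lista)

-- ===== LEMMAS AND PROOFS =====

-- T m = 0 + 1 + … + m, the m-th triangular number
def T : Nat → Nat
  | 0 => 0
  | m + 1 => T m + (m + 1)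

theorem T_succ (m : Nat) : T (m + 1) = T m + (m + 1) := rfl

theorem two_T (m : Nat) : 2 * T m = m * (m + 1) := by
  induction m with
  | zero => rfl
  | succ m ih =>
    have h : (m + 1) * (m + 1 + 1) = m * (m + 1) + 2 * (m + 1) := by ring
    have h2 := T_succ m
    omega

theorem T_le {i m : Nat} (h : i ≤ m) : T i ≤ T m := by
  induction m with
  | zero => have : i = 0 := by omega
            subst this; exact Nat.le_refl _
  | succ m ih =>
    have h2 := T_succ m
    rcases Nat.lt_or_ge i (m + 1) with h' | h'
    · have := ih (by omega); omega
    · have : i = m + 1 := by omega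
      subst this; exact Nat.le_refl _

theorem T_lt {i m : Nat} (h : i < m) : T i < T m := by
  obtain ⟨q, rfl⟩ : ∃ q, m = q + 1 := ⟨m - 1, by omega⟩
  have h2 := T_succ q
  have := T_le (show i ≤ q by omega)
  omega

theorem T_ge_self (m : Nat) : m ≤ T m := by
  induction m with
  | zero => omega
  | succ m ih => have h2 := T_succ m; omega

-- ---- A side: tamanho on a triangular argument ----

theorem tamanhoAux_T (m : Nat) : ∀ c i : Nat, i ≤ m → m - i = c →
    tamanhoAux ((T m : Nat) : Int) ((T i : Int) - (i : Int)) (i : Int) = some ((m : Int) + 1) := by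
  intro c
  induction c with
  | zero =>
    intro i hi hc
    have : i = m := by omega
    subst this
    rw [tamanhoAux, dif_pos (by omega), if_pos (by ring)]
  | succ c ih =>
    intro i hi hc
    have hlt : i < m := by omega
    have hle := T_le (Nat.le_of_lt hlt)
    have hne := T_lt hlt
    rw [tamanhoAux, dif_pos (by omega), if_neg (by omega)]
    have h1 : (T i : Int) - (i : Int) + (i : Int) = (T (i + 1) : Int) - ((i : Int) + 1) := by
      have := T_succ i; push_cast [this]; ring
    have h2 : ((i : Int) + 1) = (((i + 1 : Nat)) : Int) := by push_cast; ring
    rw [h1, h2]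
    exact ih (i + 1) (by omega) (by omega)

theorem tamanho_T (m : Nat) : tamanho ((T m : Nat) : Int) = some ((m : Int) + 1) := by
  have h := tamanhoAux_T m m 0 (by omega) (by omega)
  simpa [tamanho, T] using h

-- ---- A side: the nested loops of somaLinhas ----

-- sum of lista[x0], …, lista[x0+i-1] read through pyGetD
def S (lista : List Int) (x0 i : Nat) : Int :=
  ((List.range i).map (fun j => PySem.List.pyGetD lista ((x0 + j : Nat) : Int) 0)).sum

theorem mod_two_cases (h : Int) : PySem.Int.mod h 2 = 0 ∨ PySem.Int.mod h 2 = 1 := by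
  have h1 := PySem.Int.mod_nonneg h (b := 2) (by omega)
  have h2 := PySem.Int.mod_lt h (b := 2) (by omega)
  omega

theorem innerLoop (lista : List Int) (h : Int) : ∀ (i x0 : Nat) (sa sp : Int),
    (PySem.List.pyRange 0 (i : Int) 1).foldl (innerStep lista h) (sa, sp, (x0 : Int)) =
      (sa + (if PySem.Int.mod h 2 = 0 then S lista x0 i else 0),
       sp + (if PySem.Int.mod h 2 = 1 then S lista x0 i else 0),
       ((x0 + i : Nat) : Int)) := by
  intro i
  induction i with
  | zero =>
    intro x0 sa sp
    rw [show ((0 : Nat) : Int) = 0 by rfl, PySem.List.pyRange_one_eq_nil (by omega)]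
    simp [S]
  | succ i ih =>
    intro x0 sa sp
    have hsplit : PySem.List.pyRange 0 (((i + 1 : Nat)) : Int) 1 =
        PySem.List.pyRange 0 (i : Int) 1 ++ [(i : Int)] := by
      rw [show (((i + 1 : Nat)) : Int) = (i : Int) + 1 by push_cast; ring]
      exact PySem.List.pyRange_one_succ_right (by omega)
    rw [hsplit, List.foldl_append, ih]
    have hS : S lista x0 (i + 1) = S lista x0 i + PySem.List.pyGetD lista ((x0 + i : Nat) : Int) 0 := by
      simp [S, List.range_succ]
    have hemod : h % 2 = PySem.Int.mod h 2 := (PySem.Int.mod_eq_emod_of_pos (a := h) (b := 2) (by omega)).symm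
    rcases mod_two_cases h with he | he
    · have hd : 2 ∣ h := (PySem.Int.mod_eq_zero_iff_dvd h 2).mp he
      have hm1 : h % 2 = 0 := by omega
      simp only [hS]
      norm_num
      simp [innerStep, hd, hm1]
      constructor
      · ring
      · ring
    · have hd : ¬ (2 ∣ h) := by rw [← PySem.Int.mod_eq_zero_iff_dvd]; omega
      have hm1 : h % 2 = 1 := by omega
      simp only [hS]
      norm_num
      simp [innerStep, hd, hm1]
      constructor
      · ring
      · ring

-- row h of the pyramid: the h elements starting at index T h - h = 0 + 1 + … + (h-1)
def rowA (lista : List Int) (h : Nat) : Int := S lista (T h - h) h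

theorem outerLoop (lista : List Int) : ∀ t : Nat,
    (PySem.List.pyRange 0 (t : Int) 1).foldl (outerStep lista) (0, 0, 0, 0, []) =
      (0, 0, ((T t - t : Nat) : Int), (t : Int), (List.range t).map (rowA lista)) := by
  intro t
  induction t with
  | zero =>
    rw [show ((0 : Nat) : Int) = 0 by rfl, PySem.List.pyRange_one_eq_nil (by omega)]
    simp [T]
  | succ t ih =>
    have hsplit : PySem.List.pyRange 0 (((t + 1 : Nat)) : Int) 1 =
        PySem.List.pyRange 0 (t : Int) 1 ++ [(t : Int)] := by
      rw [show (((t + 1 : Nat)) : Int) = (t : Int) + 1 by push_cast; ring]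
      exact PySem.List.pyRange_one_succ_right (by omega)
    rw [hsplit, List.foldl_append, ih]
    have hmod : PySem.Int.mod (t : Int) 2 = ((t % 2 : Nat) : Int) := by
      rw [PySem.Int.mod_eq_emod_of_pos (a := (t : Int)) (b := 2) (by omega)]
      push_cast
      rfl
    have hrow := innerLoop lista (t : Int) t (T t - t) 0 0
    have hx : T t - t + t = T (t + 1) - (t + 1) := by
      have h1 := T_succ t; have h2 := T_ge_self t; omega
    have hvet : (List.range t).map (rowA lista) ++ [rowA lista t] =
        (List.range (t + 1)).map (rowA lista) := by
      rw [List.range_succ, List.map_append]; rfl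
    rcases Nat.even_or_odd t with ⟨w, hw⟩ | ⟨w, hw⟩
    · have hc : PySem.Int.mod (t : Int) 2 = 0 := by omega
      have hd : (2 : Int) ∣ (t : Int) := (PySem.Int.mod_eq_zero_iff_dvd _ _).mp hc
      simp [outerStep, hrow, hd, rowA, hx, ← hvet]
    · have hc : PySem.Int.mod (t : Int) 2 = 1 := by omega
      have hd : ¬ ((2 : Int) ∣ (t : Int)) := by
        rw [← PySem.Int.mod_eq_zero_iff_dvd]; omega
      have hm1 : (t : Int) % 2 = 1 := by
        rw [← PySem.Int.mod_eq_emod_of_pos (a := (t : Int)) (b := 2) (by omega)]; exact hc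
      simp [outerStep, hrow, hm1, rowA, hx, ← hvet]

theorem somaLinhas_T (lista : List Int) (m : Nat) (hlen : lista.length = T m) :
    somaLinhas lista = (List.range (m + 1)).map (rowA lista) := by
  unfold somaLinhas
  rw [hlen]
  rw [tamanho_T m]
  have h2 : ((m : Int) + 1) = (((m + 1 : Nat)) : Int) := by push_cast; ring
  simp only [h2, outerLoop lista (m + 1)]

-- ---- B side: slice sums and the row-count search ----

theorem dropTake_sum (lista : List Int) : ∀ (i x0 : Nat), x0 + i ≤ lista.length →
    ((lista.drop x0).take i).sum = S lista x0 i := by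
  intro i
  induction i with
  | zero => intro x0 _h; simp [S]
  | succ i ih =>
    intro x0 h
    have hlt : x0 + i < lista.length := by omega
    have h1 : (lista.drop x0).take (i + 1) = (lista.drop x0).take i ++ [lista[x0 + i]] := by
      rw [List.take_add_one]
      congr 1
      rw [List.getElem?_drop, List.getElem?_eq_getElem hlt]
      rfl
    rw [h1, List.sum_append, ih x0 (by omega)]
    have h2 : S lista x0 (i + 1) = S lista x0 i + PySem.List.pyGetD lista ((x0 + i : Nat) : Int) 0 := by
      simp [S, List.range_succ]
    have h3 : PySem.List.pyGetD lista ((x0 + i : Nat) : Int) 0 = lista[x0 + i] := by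
      rw [PySem.List.pyGetD_natCast]
      exact List.getD_eq_getElem _ _ hlt
    rw [h2, h3]
    simp

theorem sliceSum (lista : List Int) (idx k : Nat) (h : idx + k ≤ lista.length) :
    (PySem.List.slice lista (some (idx : Int)) (some ((idx : Int) + (k : Int)))).sum
      = S lista idx k := by
  rw [PySem.List.slice_natCast_add]
  exact dropTake_sum lista k idx h

theorem findR_T (m : Nat) : ∀ c r : Nat, 1 ≤ r → r ≤ m + 1 → m + 1 - r = c →
    findR (T m) r = m + 1 := by
  intro c
  induction c with
  | zero =>
    intro r h1 h2 hc
    have : r = m + 1 := by omega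
    subst this
    rw [findR]
    have hTr : (m + 1) * (m + 1 - 1) / 2 = T m := by
      have ha := two_T m
      have hb : (m + 1) * (m + 1 - 1) = m * (m + 1) := by
        rw [Nat.mul_comm]; congr 1
      omega
    rw [dif_neg (by omega)]
  | succ c ih =>
    intro r h1 h2 hc
    have hrm : r ≤ m := by omega
    rw [findR]
    have hTr : r * (r - 1) / 2 = T (r - 1) := by
      have ha := two_T (r - 1)
      have hb : r - 1 + 1 = r := by omega
      rw [hb] at ha
      have hc2 : r * (r - 1) = (r - 1) * r := Nat.mul_comm _ _
      omega
    have hlt : T (r - 1) < T m := T_lt (by omega)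
    rw [dif_pos (by omega)]
    exact ih (r + 1) (by omega) (by omega) (by omega)

-- ---- the parity-checking loops agree ----

theorem chk_bLoop (lista : List Int) (m : Nat) (hlen : lista.length = T m) :
    ∀ c k : Nat, 1 ≤ k → k ≤ m + 1 → m + 1 - k = c →
    parChk ((List.range (m + 1 - k)).map (fun j => rowA lista (k + j))) ((k : Int) - 1)
        (decide (1 < k)) =
      bLoop lista (T m) (m + 1) k (T k - k) := by
  intro c
  induction c with
  | zero =>
    intro k h1 h2 hc
    have : k = m + 1 := by omega
    subst this
    rw [bLoop, dif_neg (by omega)]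
    simp only [Nat.sub_self, List.range_zero, List.map_nil, parChk]
    rw [decide_eq_decide]
    constructor
    · intro h; have := T_ge_self m; omega
    · intro h
      by_contra hb
      have hm0 : m = 0 := by omega
      subst hm0
      simp [T] at h
  | succ c ih =>
    intro k h1 h2 hc
    obtain ⟨q, rfl⟩ : ∃ q, k = q + 1 := ⟨k - 1, by omega⟩
    have hkm : q + 1 ≤ m := by omega
    have hrange : (List.range (m + 1 - (q + 1))).map (fun j => rowA lista (q + 1 + j)) =
        rowA lista (q + 1) :: (List.range (m - (q + 1))).map (fun j => rowA lista (q + 2 + j)) := by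
      rw [show m + 1 - (q + 1) = (m - (q + 1)) + 1 from by omega, List.range_succ_eq_map,
        List.map_cons, List.map_map]
      congr 1
      apply List.map_congr_left
      intro j _
      show rowA lista (q + 1 + (j + 1)) = rowA lista (q + 2 + j)
      congr 1
      omega
    rw [hrange]
    have hidx : ((q + 1 : Nat) : Int) - 1 = ((q : Nat) : Int) := by push_cast; ring
    rw [hidx]
    -- one step of bLoop
    rw [bLoop, dif_pos (by omega)]
    have hTle : T (q + 1) - (q + 1) + (q + 1) ≤ lista.length := by
      have h4 := T_ge_self (q + 1)
      have h5 := T_le hkm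
      omega
    have hs : (PySem.List.slice lista (some ((T (q + 1) - (q + 1) : Nat) : Int))
        (some (((T (q + 1) - (q + 1) : Nat) : Int) + ((q + 1 : Nat) : Int)))).sum
          = rowA lista (q + 1) :=
      sliceSum lista (T (q + 1) - (q + 1)) (q + 1) hTle
    have hsub : q + 1 - 1 = q := by omega
    have hT2 : T (q + 1) - (q + 1) + (q + 1) = T (q + 2) - (q + 2) := by
      have h4 : T (q + 2) = T (q + 1) + (q + 2) := T_succ (q + 1)
      have h5 := T_ge_self (q + 1)
      omega
    have hih := ih (q + 2) (by omega) (by omega) (by omega)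
    rw [show m + 1 - (q + 2) = m - (q + 1) from by omega] at hih
    have hdec : decide (1 < q + 2) = true := by simp
    have hidx2 : ((q : Nat) : Int) + 1 = ((q + 2 : Nat) : Int) - 1 := by push_cast; ring
    rw [hdec] at hih
    -- branch on the parity of the row index and of the row sum
    have hmq : PySem.Int.mod ((q : Nat) : Int) 2 = ((q % 2 : Nat) : Int) := by
      rw [PySem.Int.mod_eq_emod_of_pos (a := ((q : Nat) : Int)) (b := 2) (by omega)]
      push_cast
      rfl
    rcases mod_two_cases (rowA lista (q + 1)) with hr | hr <;>
      rcases Nat.even_or_odd q with ⟨w, hw⟩ | ⟨w, hw⟩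
    · -- row sum even, index even: both continue
      have hq2 : q % 2 = 0 := by omega
      simp only [parChk, hmq, hq2, hr, hs, hsub, hT2]
      norm_num
      rw [hidx2]
      exact hih
    · -- row sum even, index odd: both return False
      have hq2 : q % 2 = 1 := by omega
      simp only [parChk, hmq, hq2, hr, hs, hsub, hT2]
      norm_num
    · -- row sum odd, index even: both return False
      have hq2 : q % 2 = 0 := by omega
      simp only [parChk, hmq, hq2, hr, hs, hsub, hT2]
      norm_num
    · -- row sum odd, index odd: both continue
      have hq2 : q % 2 = 1 := by omega
      simp only [parChk, hmq, hq2, hr, hs, hsub, hT2]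
      norm_num
      rw [hidx2]
      exact hih

theorem parPiramidal_spec : Claim_equal_parPiramidal := by
  intro lista _hdom hpre
  unfold Spec_parPiramidal
  obtain ⟨m, _hmlt, hm⟩ := hpre
  have hlen : lista.length = T m := by have := two_T m; omega
  -- A side reduces to parChk on the trimmed row sums
  have hA : parPiramidal lista =
      parChk ((List.range (m + 1 - 1)).map (fun j => rowA lista (1 + j))) ((1 : Int) - 1)
        (decide (1 < 1)) := by
    unfold parPiramidal
    rw [somaLinhas_T lista m hlen, List.range_succ_eq_map, List.map_cons]
    have hrow0 : rowA lista 0 = 0 := by simp [rowA, S]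
    rw [hrow0]
    simp only [PySem.List.remove?_cons_self, List.map_map]
    simp only [Nat.add_sub_cancel]
    congr 1
    apply List.map_congr_left
    intro j _
    show rowA lista (j + 1) = rowA lista (1 + j)
    congr 1
    omega
  -- B side reduces to bLoop
  have hB : parPiramidal_alt lista = bLoop lista (T m) (m + 1) 1 0 := by
    unfold parPiramidal_alt
    rw [hlen]
    simp only [findR_T m m 1 (by omega) (by omega) (by omega)]
    have hTr : (m + 1) * (m + 1 - 1) / 2 = T m := by
      have ha := two_T m
      have hb : (m + 1) * (m + 1 - 1) = m * (m + 1) := by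
        rw [Nat.mul_comm]; congr 1
      omega
    rw [if_neg (by omega)]
  rw [hA, hB]
  have := chk_bLoop lista m hlen m 1 (by omega) (by omega) (by omega)
  rw [show T 1 - 1 = 0 from rfl] at this
  rw [← this]
  norm_num
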